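-- pv_equiv track=rewrite | github.com/mpaolodr/p_problems | gca-prac/attempt1.py | alternatingSort
-- ===== SOURCE A (Python) =====
-- def alternatingSort(a):
--
--     if len(a) <= 1:
--
--         return True
--
--     pointer_a = 0
--     pointer_b = len(a) - 1
--
--     new_arr = [0] * len(a)
--
--     pointer_c = 0
--
--     while pointer_c < len(new_arr) and pointer_a < pointer_b:
--
--         new_arr[pointer_c] = a[pointer_a]
--
--         pointer_a += 1
--         pointer_c += 1
--
--         new_arr[pointer_c] = a[pointer_b]
--
--         pointer_b -= 1
--         pointer_c += 1
--
--     if pointer_a == pointer_b: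
--
--         new_arr[pointer_c] = a[pointer_b]
--
--     for i in range(len(new_arr) - 1):
--
--         if new_arr[i] >= new_arr[i + 1]:
--
--             return False
--
--     return True
-- ===== SOURCE B (Python) =====
-- def alternatingSort(a):
--     if len(a) <= 1:
--         return True
--     lo, hi = 1, len(a) - 1
--     prev = a[0]
--     while lo <= hi:
--         if prev >= a[hi]:
--             return False
--         prev = a[hi]
--         hi -= 1
--         if lo <= hi:
--             if prev >= a[lo]:
--                 return False
--             prev = a[lo]
--             lo += 1
--     return True
-- ===== Notes on version B (the rewrite author's own statement) =====
-- stated objective: faster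
-- what changed: B drops A's preallocated interleaved buffer and second scanning pass entirely: a single fused two-pointer pass (lo from the front, hi from the back) keeps only the previous emitted value and returns False at the first non-increasing step.
import Mathlib
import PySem

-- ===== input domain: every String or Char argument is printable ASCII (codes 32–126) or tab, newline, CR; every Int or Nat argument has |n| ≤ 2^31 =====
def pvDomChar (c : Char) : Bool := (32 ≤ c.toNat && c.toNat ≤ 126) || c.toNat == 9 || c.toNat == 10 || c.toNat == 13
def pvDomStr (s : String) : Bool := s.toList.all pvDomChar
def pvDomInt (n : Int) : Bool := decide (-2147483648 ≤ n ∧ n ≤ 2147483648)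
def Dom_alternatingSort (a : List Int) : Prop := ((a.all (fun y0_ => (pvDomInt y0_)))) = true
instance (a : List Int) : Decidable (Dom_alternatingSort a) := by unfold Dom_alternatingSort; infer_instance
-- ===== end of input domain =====

-- B replaces A's "preallocate an interleaved buffer, then scan it" with a single fused
-- two-pointer pass that keeps only the previous value (alternative decomposition; early exit).

-- ===== PORT A =====
-- the while loop: fills new_arr at pc, pc+1 with a[pa], a[pb]; returns final (arr, pa, pb, pc)
def loopA (a : List Int) (arr : List Int) (pa pb pc : Nat) : List Int × Nat × Nat × Nat :=
  if h : pc < arr.length ∧ pa < pb then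
    loopA a ((arr.set pc (a.getD pa 0)).set (pc + 1) (a.getD pb 0)) (pa + 1) (pb - 1) (pc + 2)
  else (arr, pa, pb, pc)
termination_by pb - pa
decreasing_by omega

-- the loop followed by the 'if pointer_a == pointer_b' middle-element write
def buildA (a : List Int) (arr : List Int) (pa pb pc : Nat) : List Int :=
  match loopA a arr pa pb pc with
  | (arr', pa', pb', pc') => if pa' = pb' then arr'.set pc' (a.getD pb' 0) else arr'

def alternatingSort (a : List Int) : Bool :=
  if a.length ≤ 1 then true
  else
    let arr := buildA a (List.replicate a.length 0) 0 (a.length - 1) 0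
    (List.range (arr.length - 1)).all (fun i => !decide (arr.getD i 0 ≥ arr.getD (i + 1) 0))

-- ===== PORT B =====
-- fused zig-zag check: prev is the previously emitted value, lo/hi the remaining window
def loopB (a : List Int) (lo hi : Nat) (prev : Int) : Bool :=
  if _h : lo ≤ hi then
    if prev ≥ a.getD hi 0 then false
    else if _h2 : lo ≤ hi - 1 then
      if a.getD hi 0 ≥ a.getD lo 0 then false
      else loopB a (lo + 1) (hi - 1) (a.getD lo 0)
    else true
  else true
termination_by hi + 1 - lo
decreasing_by omega

def alternatingSort_alt (a : List Int) : Bool :=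
  if a.length ≤ 1 then true
  else loopB a 1 (a.length - 1) (a.getD 0 0)

-- ===== PRECONDITION & SPEC =====
def Spec_alternatingSort (a : List Int) (out : Bool) : Prop := out = alternatingSort_alt a
instance (a : List Int) (out : Bool) : Decidable (Spec_alternatingSort a out) := by unfold Spec_alternatingSort; infer_instance

-- ===== CLAIM (what is proved, stated in full; the proofs are below) =====
def Claim_equal_alternatingSort : Prop := ∀ (a : List Int), Dom_alternatingSort a → Spec_alternatingSort a (alternatingSort a)

-- ===== LEMMAS AND PROOFS =====

def zigZag : List Int → List Int
  | [] => []
  | x :: xs => x :: zigZag xs.reverse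
termination_by l => l.length
decreasing_by simp

def chainLt : List Int → Bool
  | [] => true
  | [_] => true
  | x :: y :: l => (decide (x < y)) && chainLt (y :: l)

lemma zigZag_rev_concat (ys : List Int) (y : Int) :
    zigZag ((ys ++ [y]).reverse) = y :: zigZag ys := by
  simp [zigZag]

lemma seg_cons (a : List Int) (lo k : Nat) (h : lo < a.length) (hk : 1 ≤ k) :
    (a.drop lo).take k = a.getD lo 0 :: (a.drop (lo + 1)).take (k - 1) := by
  cases k with
  | zero => omega
  | succ m =>
    simp only [List.getD_eq_getElem _ _ h]
    rw [List.drop_eq_getElem_cons h, List.take_succ_cons]; norm_num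

lemma seg_concat (a : List Int) (lo k : Nat) (h : lo + k ≤ a.length) (hk : 1 ≤ k) :
    (a.drop lo).take k = (a.drop lo).take (k - 1) ++ [a.getD (lo + k - 1) 0] := by
  cases k with
  | zero => omega
  | succ m =>
    rw [List.take_add_one]
    have hm : lo + m < a.length := by omega
    simp [List.getElem?_drop, List.getElem?_eq_getElem hm, List.getD]

lemma take_set_set (arr : List Int) (pc : Nat) (x y : Int) (h : pc + 1 < arr.length) :
    ((arr.set pc x).set (pc + 1) y).take (pc + 2) = arr.take pc ++ [x, y] := by
  have hl : (List.take pc arr).length = pc := by simp; omega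
  apply List.ext_getElem
  · simp; omega
  · intro i h1 h2
    simp only [List.getElem_take, List.getElem_set]
    have : i < pc ∨ i = pc ∨ i = pc + 1 := by simp at h1; omega
    rcases this with hi | hi | hi
    · rw [if_neg (by omega), if_neg (by omega),
        List.getElem_append_left (by omega), List.getElem_take]
    · rw [if_neg (by omega), if_pos hi.symm,
        List.getElem_append_right (by omega)]
      simp [hl, hi]
    · rw [if_pos hi.symm, List.getElem_append_right (by omega)]
      simp [hl, hi]

lemma set_last (arr : List Int) (pc : Nat) (v : Int) (h : pc + 1 = arr.length) :
    arr.set pc v = arr.take pc ++ [v] := by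
  rw [List.set_eq_take_cons_drop _ (by omega)]
  rw [List.drop_eq_nil_of_le (by omega)]

lemma buildA_spec (a : List Int) :
    ∀ k pa pb pc arr, pa + k = pb + 1 → pb < a.length → pc + k = arr.length →
      buildA a arr pa pb pc = arr.take pc ++ zigZag ((a.drop pa).take k) := by
  intro k
  induction k using Nat.strong_induction_on with
  | _ k ih =>
    intro pa pb pc arr h1 h2 h3
    match k, h1 with
    | 0, h1 =>
      unfold buildA
      rw [loopA, dif_neg (by omega)]
      simp only
      rw [if_neg (by omega)]
      simp [zigZag]
      omega
    | 1, h1 =>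
      have hpa : pa = pb := by omega
      unfold buildA
      rw [loopA, dif_neg (by omega)]
      simp only
      rw [if_pos hpa]
      rw [set_last arr pc _ (by omega)]
      rw [seg_cons a pa 1 (by omega) (by omega)]
      simp [zigZag, hpa]
    | (m + 2), h1 =>
      have hpb : pa < pb := by omega
      have hpc : pc < arr.length := by omega
      have hstep : loopA a arr pa pb pc
          = loopA a ((arr.set pc (a.getD pa 0)).set (pc + 1) (a.getD pb 0)) (pa + 1) (pb - 1) (pc + 2) := by
        rw [loopA, dif_pos ⟨hpc, hpb⟩]
      have hb : buildA a arr pa pb pc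
          = buildA a ((arr.set pc (a.getD pa 0)).set (pc + 1) (a.getD pb 0)) (pa + 1) (pb - 1) (pc + 2) := by
        unfold buildA
        rw [hstep]
      rw [hb, ih m (by omega) (pa + 1) (pb - 1) (pc + 2) _ (by omega) (by omega) (by simp; omega)]
      rw [take_set_set arr pc _ _ (by omega)]
      rw [seg_cons a pa (m + 2) (by omega) (by omega)]
      have h4 : (a.drop (pa + 1)).take (m + 2 - 1)
          = (a.drop (pa + 1)).take m ++ [a.getD pb 0] := by
        have := seg_concat a (pa + 1) (m + 1) (by omega) (by omega)
        have he : pa + 1 + (m + 1) - 1 = pb := by omega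
        rw [he] at this
        simpa using this
      rw [h4]
      rw [show zigZag (a.getD pa 0 :: ((a.drop (pa+1)).take m ++ [a.getD pb 0]))
          = a.getD pa 0 :: zigZag (((a.drop (pa+1)).take m ++ [a.getD pb 0]).reverse) from by rw [zigZag]]
      rw [zigZag_rev_concat]
      simp

lemma loopB_spec (a : List Int) :
    ∀ k lo hi prev, 1 ≤ lo → lo + k = hi + 1 → hi < a.length →
      loopB a lo hi prev = chainLt (prev :: zigZag (((a.drop lo).take k).reverse)) := by
  intro k
  induction k using Nat.strong_induction_on with
  | _ k ih =>
    intro lo hi prev hlo h1 h2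
    match k, h1 with
    | 0, h1 =>
      rw [loopB, dif_neg (by omega)]
      simp [zigZag, chainLt]
    | 1, h1 =>
      have hlh : lo = hi := by omega
      rw [loopB, dif_pos (by omega)]
      rw [seg_cons a lo 1 (by omega) (by omega)]
      subst hlh
      by_cases hc : prev ≥ a.getD lo 0
      · rw [if_pos hc]
        simp [zigZag, chainLt] at hc ⊢
        omega
      · rw [if_neg hc, dif_neg (by omega)]
        simp [zigZag, chainLt] at hc ⊢
        omega
    | (m + 2), h1 =>
      rw [seg_cons a lo (m + 2) (by omega) (by omega)]
      have h4 : (a.drop (lo + 1)).take (m + 2 - 1)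
          = (a.drop (lo + 1)).take m ++ [a.getD hi 0] := by
        have := seg_concat a (lo + 1) (m + 1) (by omega) (by omega)
        have he : lo + 1 + (m + 1) - 1 = hi := by omega
        rw [he] at this
        simpa using this
      rw [h4]
      have hz : zigZag ((a.getD lo 0 :: ((a.drop (lo+1)).take m ++ [a.getD hi 0])).reverse)
          = a.getD hi 0 :: a.getD lo 0 :: zigZag (((a.drop (lo+1)).take m).reverse) := by
        simp [zigZag]
      rw [hz]
      rw [loopB, dif_pos (by omega)]
      by_cases hc1 : prev ≥ a.getD hi 0
      · rw [if_pos hc1]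
        simp [chainLt] at hc1 ⊢
        omega
      · rw [if_neg hc1, dif_pos (by omega)]
        by_cases hc2 : a.getD hi 0 ≥ a.getD lo 0
        · rw [if_pos hc2]
          simp [chainLt] at hc1 hc2 ⊢
          omega
        · rw [if_neg hc2]
          rw [ih m (by omega) (lo + 1) (hi - 1) _ (by omega) (by omega) (by omega)]
          simp [chainLt] at hc1 hc2 ⊢
          rw [decide_eq_true hc1, decide_eq_true hc2]
          simp

lemma chainLt_iff (l : List Int) :
    chainLt l = true ↔ ∀ i, i + 1 < l.length → l.getD i 0 < l.getD (i + 1) 0 := by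
  induction l with
  | nil => simp [chainLt]
  | cons x xs ih =>
    cases xs with
    | nil => simp [chainLt]
    | cons y ys =>
      rw [chainLt]
      simp only [Bool.and_eq_true, decide_eq_true_eq, ih]
      constructor
      · rintro ⟨hxy, h⟩ i hi
        cases i with
        | zero => simpa using hxy
        | succ j => simpa using h j (by simpa using hi)
      · intro h
        refine ⟨by simpa using h 0 (by simp), fun i hi => ?_⟩
        simpa using h (i + 1) (by simpa using hi)

lemma scan_eq_chainLt (l : List Int) :
    ((List.range (l.length - 1)).all (fun i => !decide (l.getD i 0 ≥ l.getD (i + 1) 0))) = chainLt l := by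
  rw [Bool.eq_iff_iff, chainLt_iff]
  simp only [List.all_eq_true, List.mem_range, Bool.not_eq_eq_eq_not, Bool.not_true,
    decide_eq_false_iff_not, not_le]
  constructor
  · intro h i hi; exact h i (by omega)
  · intro h i hi; exact h i (by omega)

-- ===== VERDICT (by name: the statement is the Claim_ definition above) =====
theorem alternatingSort_spec : Claim_equal_alternatingSort := by
  intro a _dom
  unfold Spec_alternatingSort alternatingSort alternatingSort_alt
  by_cases h : a.length ≤ 1
  · simp [h]
  · rw [if_neg h, if_neg h]
    rw [buildA_spec a a.length 0 (a.length - 1) 0 (List.replicate a.length 0)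
      (by omega) (by omega) (by simp)]
    rw [loopB_spec a (a.length - 1) 1 (a.length - 1) (a.getD 0 0) (by omega) (by omega) (by omega)]
    simp only [List.take_zero, List.nil_append, List.drop_zero, List.take_length]
    rw [scan_eq_chainLt]
    congr 1
    cases a with
    | nil => simp at h
    | cons x xs =>
      rw [zigZag]
      simp [List.take_of_length_le]
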